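-- pv_equiv track=rewrite | github.com/HeeJu-XiJu/Algorithm | programmers/level1/대충만든자판/sol.py | solution
-- ===== SOURCE A (Python) =====
-- def solution(keymap, targets):
--     keydict = {}
--     for key in keymap:
--         for alp in key:
--             if alp not in keydict.keys():
--                 keydict[alp] = key.find(alp)
--             elif alp in keydict.keys() and keydict[alp] > key.find(alp):
--                 keydict[alp] = key.find(alp)
--
--     answer = []
--     for target in targets:
--         answersum = 0
--         for alp in target:
--             if alp not in keydict.keys():
--                 answersum = -1
--                 break
--             else:
--                 answersum += keydict[alp]+1
--         answer.append(answersum)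
--     return answer
-- ===== SOURCE B (Python) =====
-- def solution(keymap, targets):
--     # Per-target scan of the keymaps directly; no precomputed dictionary.
--     answer = []
--     for target in targets:
--         total = 0
--         for alp in target:
--             candidates = [k.find(alp) for k in keymap if alp in k]
--             if not candidates:
--                 total = -1
--                 break
--             total += min(candidates) + 1
--         answer.append(total)
--     return answer
-- ===== Notes on version B (the rewrite author's own statement) =====
-- stated objective: alternative
-- what changed: B drops A's precomputed minimum-index dictionary and instead, for each target character, scans the keymaps directly, taking the minimum of the first-occurrence indices of the keys that contain it (-1 and break when none does).
import Mathlib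
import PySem

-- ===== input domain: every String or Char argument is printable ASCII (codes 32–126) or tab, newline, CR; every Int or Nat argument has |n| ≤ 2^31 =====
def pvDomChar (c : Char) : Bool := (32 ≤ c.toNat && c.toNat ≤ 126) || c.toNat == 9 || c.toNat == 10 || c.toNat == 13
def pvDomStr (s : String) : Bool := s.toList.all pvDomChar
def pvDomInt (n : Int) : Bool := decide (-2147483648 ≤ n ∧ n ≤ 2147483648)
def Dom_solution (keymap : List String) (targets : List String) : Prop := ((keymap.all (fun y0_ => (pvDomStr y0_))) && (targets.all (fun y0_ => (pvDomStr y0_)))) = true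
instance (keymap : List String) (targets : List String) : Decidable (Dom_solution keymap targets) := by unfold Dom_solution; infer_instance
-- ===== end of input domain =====

-- B replaces A's precomputed minimum-index table by a direct per-character scan of the keymaps (alternative decomposition, same results).

-- ===== PORT A =====
-- key.find(alp) : single-character substring find (exact via PySem.Chars.find)
def pvFindC (k : List Char) (c : Char) : Int := PySem.Chars.find k [c]

-- the inner 'for alp in key' body of A's dict-building loop
def pvStepA (key : List Char) (d : PySem.Dict Char Int) (alp : Char) : PySem.Dict Char Int :=
  match d.get? alp with
  | none => d.insert alp (pvFindC key alp)                     -- alp not in keydict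
  | some v => if v > pvFindC key alp then d.insert alp (pvFindC key alp) else d

def pvBuildDict (keymap : List String) : PySem.Dict Char Int :=
  keymap.foldl (fun d key => key.toList.foldl (pvStepA key.toList) d) PySem.Dict.empty

-- the 'for alp in target' loop with its break
def pvSumA (d : PySem.Dict Char Int) : List Char → Int → Int
  | [], s => s
  | c :: rest, s =>
    match d.get? c with
    | none => -1                                               -- answersum = -1; break
    | some v => pvSumA d rest (s + v + 1)

def solution (keymap : List String) (targets : List String) : List Int :=
  let keydict := pvBuildDict keymap
  targets.foldl (fun ans t => ans ++ [pvSumA keydict t.toList 0]) []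

-- ===== PORT B =====
-- [k.find(alp) for k in keymap if alp in k]  ('alp in k' is single-char substring membership, exact via PySem.Chars.isIn)
def pvCands (keymap : List String) (c : Char) : List Int :=
  keymap.filterMap (fun k => if PySem.Chars.isIn [c] k.toList then some (pvFindC k.toList c) else none)

def pvSumB (keymap : List String) : List Char → Int → Int
  | [], s => s
  | c :: rest, s =>
    match PySem.List.min? (pvCands keymap c) (fun x => x) with
    | none => -1                                               -- not candidates: total = -1; break
    | some m => pvSumB keymap rest (s + m + 1)

def solution_alt (keymap : List String) (targets : List String) : List Int :=
  targets.map (fun t => pvSumB keymap t.toList 0)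

-- ===== PRECONDITION & SPEC =====
def Spec_solution (keymap : List String) (targets : List String) (out : List Int) : Prop := out = solution_alt keymap targets
instance (keymap : List String) (targets : List String) (out : List Int) : Decidable (Spec_solution keymap targets out) := by unfold Spec_solution; infer_instance

-- ===== CLAIM (what is proved, stated in full; the proofs are below) =====
def Claim_equal_solution : Prop := ∀ (keymap : List String) (targets : List String), Dom_solution keymap targets → Spec_solution keymap targets (solution keymap targets)

-- ===== LEMMAS AND PROOFS =====

-- merge of an optional running minimum with a new value
def pvMrg (o : Option Int) (v : Int) : Option Int :=
  match o with
  | none => some v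
  | some m => some (min m v)

theorem pv_isIn_singleton (c : Char) (l : List Char) :
    PySem.Chars.isIn [c] l = true ↔ c ∈ l := by
  rw [PySem.Chars.isIn_iff_infix]
  constructor
  · rintro ⟨pre, suf, h⟩; subst h; simp
  · intro h
    obtain ⟨pre, suf, h⟩ := List.append_of_mem h
    exact ⟨pre, suf, by simp [h]⟩

theorem pv_innerA (key : List Char) (l : List Char) (d : PySem.Dict Char Int) (c : Char) :
    (l.foldl (pvStepA key) d).get? c =
      if c ∈ l then pvMrg (d.get? c) (pvFindC key c) else d.get? c := by
  induction l generalizing d with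
  | nil => simp
  | cons a l ih =>
    have hstep : ∀ x, (pvStepA key d a).get? x =
        if x = a then pvMrg (d.get? a) (pvFindC key a) else d.get? x := by
      intro x
      unfold pvStepA pvMrg
      rcases h : d.get? a with _ | v
      · by_cases hx : x = a
        · subst hx; simp [PySem.Dict.get?_insert_self]
        · simp [PySem.Dict.get?_insert_of_ne _ _ (by simpa [eq_comm] using hx), hx]
      · dsimp only
        by_cases hx : x = a
        · subst hx
          by_cases hv : pvFindC key x < v
          · rw [if_pos hv, if_pos rfl, PySem.Dict.get?_insert_self,
              min_eq_right (le_of_lt hv)]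
          · rw [if_neg hv, if_pos rfl, h, min_eq_left (le_of_not_gt hv)]
        · by_cases hv : pvFindC key a < v
          · rw [if_pos hv, if_neg hx,
              PySem.Dict.get?_insert_of_ne _ _ (by simpa [eq_comm] using hx)]
          · rw [if_neg hv, if_neg hx]
    simp only [List.foldl_cons, ih, hstep]
    by_cases hc : c = a
    · subst hc
      by_cases hl : c ∈ l
      · simp only [if_pos hl, if_pos (List.mem_cons_self), pvMrg]
        cases d.get? c <;> simp
      · simp [hl]
    · by_cases hl : c ∈ l <;> simp [hc, hl]

-- folding pvMrg over a value list computes the (optional) minimum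
theorem pv_foldl_mrg (l : List Int) (o : Option Int) :
    l.foldl pvMrg o =
      match o with
      | none => PySem.List.min? l (fun x => x)
      | some m => some (l.foldl min m) := by
  induction l generalizing o with
  | nil => cases o <;> simp [PySem.List.min?]
  | cons v l ih =>
    cases o with
    | none =>
      simp only [List.foldl_cons, pvMrg, ih]
      rw [PySem.List.min?_id_cons]
    | some m => simp [pvMrg, ih]

theorem pv_dict_eq (keymap : List String) (d : PySem.Dict Char Int) (c : Char) :
    (keymap.foldl (fun d key => key.toList.foldl (pvStepA key.toList) d) d).get? c =
      (pvCands keymap c).foldl pvMrg (d.get? c) := by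
  induction keymap generalizing d with
  | nil => simp [pvCands]
  | cons k ks ih =>
    rw [List.foldl_cons, ih]
    unfold pvCands
    rw [List.filterMap_cons]
    by_cases hk : c ∈ k.toList
    · rw [if_pos ((pv_isIn_singleton c k.toList).2 hk), List.foldl_cons,
        pv_innerA k.toList k.toList d c, if_pos hk]
    · rw [if_neg (fun h => hk ((pv_isIn_singleton c k.toList).1 h)),
        pv_innerA k.toList k.toList d c, if_neg hk]

theorem pv_dict_min (keymap : List String) (c : Char) :
    (pvBuildDict keymap).get? c = PySem.List.min? (pvCands keymap c) (fun x => x) := by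
  unfold pvBuildDict
  rw [pv_dict_eq keymap PySem.Dict.empty c, PySem.Dict.get?_empty, pv_foldl_mrg]

theorem pv_sum_eq (keymap : List String) (l : List Char) (s : Int) :
    pvSumA (pvBuildDict keymap) l s = pvSumB keymap l s := by
  induction l generalizing s with
  | nil => rfl
  | cons c l ih =>
    simp only [pvSumA, pvSumB, pv_dict_min keymap c]
    cases PySem.List.min? (pvCands keymap c) (fun x => x) with
    | none => rfl
    | some m => exact ih _

-- ===== VERDICT (by name: the statement is the Claim_ definition above) =====
theorem solution_spec : Claim_equal_solution := by
  intro keymap targets _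
  show solution keymap targets = solution_alt keymap targets
  unfold solution solution_alt
  rw [PySem.List.foldl_append_singleton_eq_map]
  exact List.map_congr_left (fun t _ => pv_sum_eq keymap t.toList 0)
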